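-- pv_equiv track=rewrite | github.com/HongminAn03/EM-Pulse-Algorithm | Gen_EMPS.py | search_closest
-- ===== SOURCE A (Python) =====
-- def search_closest(input_values):
--     result = []
--
--     for i, val in enumerate(input_values):
--         min_lower_diff = float('inf')
--         min_upper_diff = float('inf')
--         lower_index = None
--         upper_index = None
--
--         for j, other in enumerate(input_values):
--             if i == j:
--                 continue
--             diff = abs(val - other)
--
--             if other < val:
--                 if diff < min_lower_diff:
--                     min_lower_diff = diff
--                     lower_index = j
--             elif other > val:
--                 if diff < min_upper_diff:
--                     min_upper_diff = diff
--                     upper_index = j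
--
--         result.append((lower_index, upper_index))
--     return result
-- ===== SOURCE B (Python) =====
-- def search_closest(input_values):
--     # O(n log n): first-occurrence index per value, sort distinct values,
--     # then each value's lower/upper neighbour is its predecessor/successor
--     # in the sorted distinct list.
--     first = {}
--     for i, v in enumerate(input_values):
--         if v not in first:
--             first[v] = i
--     vals = sorted(first)
--     pred = {}
--     succ = {}
--     prev = None
--     for v in vals:
--         pred[v] = None if prev is None else first[prev]
--         if prev is not None:
--             succ[prev] = first[v]
--         succ[v] = None
--         prev = v
--     return [(pred[v], succ[v]) for v in input_values]
-- ===== Notes on version B (the rewrite author's own statement) =====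
-- stated objective: faster
-- what changed: Replaces the all-pairs diff-minimizing scan with: one pass recording each value's first index, a sort of the distinct values, and one pass pairing each distinct value with its sorted predecessor/successor, then an O(1) dict lookup per element.
import Mathlib
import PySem

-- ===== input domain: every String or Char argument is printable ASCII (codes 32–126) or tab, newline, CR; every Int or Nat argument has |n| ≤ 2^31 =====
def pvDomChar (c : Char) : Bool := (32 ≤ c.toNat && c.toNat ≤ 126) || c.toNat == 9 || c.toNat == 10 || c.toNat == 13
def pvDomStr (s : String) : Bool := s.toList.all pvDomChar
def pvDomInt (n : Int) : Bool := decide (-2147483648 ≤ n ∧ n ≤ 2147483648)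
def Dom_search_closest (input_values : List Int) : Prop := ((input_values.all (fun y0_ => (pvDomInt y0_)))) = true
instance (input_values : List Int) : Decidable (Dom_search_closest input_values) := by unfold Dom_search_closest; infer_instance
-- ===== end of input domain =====

-- B replaces A's all-pairs scan by first-index dict + sort of distinct values + one
-- predecessor/successor pass (O(n log n) vs O(n^2)); return values are identical.

-- ===== PORT A =====
-- float('inf') sentinel: the running min diff is `none` before the first update; all
-- actual diffs are finite ints, so `none = +inf` with this comparison is exact.
def pvLtInf (d : Int) : Option Int → Bool
  | none => true
  | some m => d < m

def search_closest (input_values : List Int) : List (Option Int × Option Int) :=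
  (PySem.List.enumerate input_values 0).foldl (fun result p =>
    let i := p.1
    let val := p.2
    -- inner loop state: ((min_lower_diff, lower_index), (min_upper_diff, upper_index))
    let st := (PySem.List.enumerate input_values 0).foldl
      (fun (st : (Option Int × Option Int) × (Option Int × Option Int)) q =>
        if q.1 == i then st
        else
          let diff := |val - q.2|
          if q.2 < val then
            (if pvLtInf diff st.1.1 then (some diff, some q.1) else st.1, st.2)
          else if val < q.2 then
            (st.1, if pvLtInf diff st.2.1 then (some diff, some q.1) else st.2)
          else st)
      ((none, none), (none, none))
    result ++ [(st.1.2, st.2.2)]) []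

-- ===== PORT B =====
-- the pred/succ building loop of Source B (prev carried as Option Int)
def pvPass (first : PySem.Dict Int Int) :
    List Int → Option Int → PySem.Dict Int (Option Int) → PySem.Dict Int (Option Int) →
    PySem.Dict Int (Option Int) × PySem.Dict Int (Option Int)
  | [], _, pred, succ => (pred, succ)
  | v :: rest, prev, pred, succ =>
    -- first[prev] / first[v]: prev and v are always keys of `first`, so getD's default is unreachable
    let pred' := pred.insert v (prev.map (fun p => first.getD p 0))
    let succ' := (match prev with
      | none => succ
      | some p => succ.insert p (some (first.getD v 0))).insert v none
    pvPass first rest (some v) pred' succ'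

def search_closest_alt (input_values : List Int) : List (Option Int × Option Int) :=
  let first := (PySem.List.enumerate input_values 0).foldl
    (fun d p => if d.contains p.2 then d else d.insert p.2 p.1) PySem.Dict.empty
  let vals := PySem.List.sorted first.keys (fun x => x) false
  let ps := pvPass first vals none PySem.Dict.empty PySem.Dict.empty
  -- pred[v] / succ[v]: every v ∈ input_values is a key, so getD's default is unreachable
  input_values.map (fun v => (ps.1.getD v none, ps.2.getD v none))

-- ===== PRECONDITION & SPEC =====
def Spec_search_closest (input_values : List Int) (out : List (Option Int × Option Int)) : Prop := out = search_closest_alt input_values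
instance (input_values : List Int) (out : List (Option Int × Option Int)) : Decidable (Spec_search_closest input_values out) := by unfold Spec_search_closest; infer_instance

-- ===== CLAIM (what is proved, stated in full; the proofs are below) =====
def Claim_equal_search_closest : Prop := ∀ (input_values : List Int), Dom_search_closest input_values → Spec_search_closest input_values (search_closest input_values)

-- ===== LEMMAS AND PROOFS =====

def lowIdx (l : List Int) (v : Int) : Option Int :=
  ((l.filter (fun x => decide (x < v))).max?).map (fun m => ((List.idxOf m l : Nat) : Int))

def highIdx (l : List Int) (v : Int) : Option Int :=
  ((l.filter (fun x => decide (v < x))).min?).map (fun m => ((List.idxOf m l : Nat) : Int))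

def mLow (v : Int) (st : Option Int × Option Int) (q : Int × Int) : Option Int × Option Int :=
  if q.2 < v then (if pvLtInf |v - q.2| st.1 then (some |v - q.2|, some q.1) else st) else st

def mUp (v : Int) (st : Option Int × Option Int) (q : Int × Int) : Option Int × Option Int :=
  if v < q.2 then (if pvLtInf |v - q.2| st.1 then (some |v - q.2|, some q.1) else st) else st

theorem inner_split (i v : Int) (e : List (Int × Int)) (h : ∀ q ∈ e, q.1 = i → q.2 = v) :
    ∀ (a b : Option Int × Option Int),
    e.foldl (fun (st : (Option Int × Option Int) × (Option Int × Option Int)) q =>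
        if q.1 == i then st
        else
          let diff := |v - q.2|
          if q.2 < v then
            (if pvLtInf diff st.1.1 then (some diff, some q.1) else st.1, st.2)
          else if v < q.2 then
            (st.1, if pvLtInf diff st.2.1 then (some diff, some q.1) else st.2)
          else st) (a, b)
      = (e.foldl (mLow v) a, e.foldl (mUp v) b) := by
  induction e with
  | nil => intro a b; rfl
  | cons q t ih =>
    intro a b
    simp only [List.foldl_cons]
    have ht : ∀ q ∈ t, q.1 = i → q.2 = v := fun q hq => h q (List.mem_cons_of_mem _ hq)
    by_cases hqi : q.1 = i
    · have hv : q.2 = v := h q (List.mem_cons_self) hqi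
      have : (q.1 == i) = true := by simp [hqi]
      rw [this]
      simp only [if_true]
      rw [ih ht a b]
      congr 1
      · unfold mLow; rw [hv]; simp
      · unfold mUp; rw [hv]; simp
    · have : (q.1 == i) = false := by simp [hqi]
      rw [this]
      simp only [Bool.false_eq_true, if_false]
      by_cases h1 : q.2 < v
      · have h2 : ¬ v < q.2 := by omega
        rw [ih ht]
        unfold mLow mUp
        simp [h1, h2]
      · by_cases h2 : v < q.2
        · rw [ih ht]; unfold mLow mUp; simp [h1, h2]
        · rw [ih ht]; unfold mLow mUp; simp [h1, h2]

theorem lowGo (v : Int) (l : List Int) : ∀ (s c j : Int), c < v →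
    (PySem.List.enumerate l s).foldl (mLow v) (some (v - c), some j) =
      match (l.filter (fun x => decide (c < x ∧ x < v))).max? with
      | none => (some (v - c), some j)
      | some m => (some (v - m), some (s + (List.idxOf m l : Int))) := by
  induction l with
  | nil => intro s c j _; rfl
  | cons x t ih =>
    intro s c j hc
    rw [PySem.List.enumerate_cons, List.foldl_cons]
    by_cases h1 : x < v
    · by_cases h2 : c < x
      · -- update
        have hst : mLow v (some (v - c), some j) (s, x) = (some (v - x), some s) := by
          unfold mLow pvLtInf
          simp only [h1, if_true]
          have : |v - x| = v - x := abs_of_nonneg (by omega)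
          rw [this]
          simp only [decide_eq_true_eq]
          rw [if_pos (by omega)]
        rw [hst, ih (s+1) x s h1]
        have hfc : (x :: t).filter (fun y => decide (c < y ∧ y < v))
            = x :: t.filter (fun y => decide (c < y ∧ y < v)) := by
          simp [h1, h2]
        rcases hmax : (t.filter (fun y => decide (x < y ∧ y < v))).max? with _ | m'
        · have hnil : t.filter (fun y => decide (x < y ∧ y < v)) = [] := List.max?_eq_none_iff.mp hmax
          have : ((x :: t).filter (fun y => decide (c < y ∧ y < v))).max? = some x := by
            rw [hfc, List.max?_eq_some_iff]
            constructor
            · exact List.mem_cons_self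
            · intro b hb
              rcases List.mem_cons.mp hb with rfl | hb
              · exact le_refl _
              · have hb' := List.mem_filter.mp hb
                by_contra hbx
                have : b ∈ t.filter (fun y => decide (x < y ∧ y < v)) := by
                  rw [List.mem_filter]
                  refine ⟨hb'.1, ?_⟩
                  simp only [decide_eq_true_eq] at hb' ⊢
                  omega
                rw [hnil] at this; exact absurd this (List.not_mem_nil)
          rw [this]
          simp [List.idxOf_cons_self]
        · have hm' := List.max?_eq_some_iff.mp hmax
          have hm'f := List.mem_filter.mp hm'.1
          simp only [decide_eq_true_eq] at hm'f
          have : ((x :: t).filter (fun y => decide (c < y ∧ y < v))).max? = some m' := by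
            rw [hfc, List.max?_eq_some_iff]
            constructor
            · refine List.mem_cons_of_mem _ ?_
              rw [List.mem_filter]
              refine ⟨hm'f.1, by simp only [decide_eq_true_eq]; omega⟩
            · intro b hb
              rcases List.mem_cons.mp hb with rfl | hb
              · omega
              · have hb' := List.mem_filter.mp hb
                simp only [decide_eq_true_eq] at hb'
                by_cases hbx : x < b
                · exact hm'.2 b (List.mem_filter.mpr ⟨hb'.1, by simp only [decide_eq_true_eq]; omega⟩)
                · omega
          rw [this]
          have hne : x ≠ m' := by omega
          simp only [List.idxOf_cons_ne _ hne]
          push_cast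
          ring_nf
      · -- x ≤ c : no update
        have hst : mLow v (some (v - c), some j) (s, x) = (some (v - c), some j) := by
          unfold mLow pvLtInf
          simp only [h1, if_true]
          have : |v - x| = v - x := abs_of_nonneg (by omega)
          rw [this]
          simp only [decide_eq_true_eq]
          rw [if_neg (by omega)]
        rw [hst, ih (s+1) c j hc]
        have hfc : (x :: t).filter (fun y => decide (c < y ∧ y < v))
            = t.filter (fun y => decide (c < y ∧ y < v)) := by
          simp [List.filter_cons]; omega
        rw [hfc]
        rcases hmax : (t.filter (fun y => decide (c < y ∧ y < v))).max? with _ | m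
        · rfl
        · have hm := List.max?_eq_some_iff.mp hmax
          have hmf := List.mem_filter.mp hm.1
          simp only [decide_eq_true_eq] at hmf
          have hne : x ≠ m := by omega
          simp only [List.idxOf_cons_ne _ hne]
          push_cast
          ring_nf
    · -- v ≤ x : skip
      have hst : mLow v (some (v - c), some j) (s, x) = (some (v - c), some j) := by
        unfold mLow; rw [if_neg (by simpa using h1)]
      rw [hst, ih (s+1) c j hc]
      have hfc : (x :: t).filter (fun y => decide (c < y ∧ y < v))
          = t.filter (fun y => decide (c < y ∧ y < v)) := by
        simp [List.filter_cons]; omega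
      rw [hfc]
      rcases hmax : (t.filter (fun y => decide (c < y ∧ y < v))).max? with _ | m
      · rfl
      · have hm := List.max?_eq_some_iff.mp hmax
        have hmf := List.mem_filter.mp hm.1
        simp only [decide_eq_true_eq] at hmf
        have hne : x ≠ m := by omega
        simp only [List.idxOf_cons_ne _ hne]
        push_cast
        ring_nf

theorem lowStart (v : Int) (l : List Int) : ∀ (s : Int),
    (PySem.List.enumerate l s).foldl (mLow v) (none, none) =
      match (l.filter (fun x => decide (x < v))).max? with
      | none => (none, none)
      | some m => (some (v - m), some (s + (List.idxOf m l : Int))) := by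
  induction l with
  | nil => intro s; rfl
  | cons x t ih =>
    intro s
    rw [PySem.List.enumerate_cons, List.foldl_cons]
    by_cases h1 : x < v
    · have hst : mLow v (none, none) (s, x) = (some (v - x), some s) := by
        unfold mLow pvLtInf
        simp only [h1, if_true]
        have : |v - x| = v - x := abs_of_nonneg (by omega)
        rw [this]
      rw [hst, lowGo v t (s+1) x s h1]
      have hfc : (x :: t).filter (fun y => decide (y < v))
          = x :: t.filter (fun y => decide (y < v)) := by
        simp [h1]
      rcases hmax : (t.filter (fun y => decide (x < y ∧ y < v))).max? with _ | m'
      · have hnil : t.filter (fun y => decide (x < y ∧ y < v)) = [] := List.max?_eq_none_iff.mp hmax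
        have : ((x :: t).filter (fun y => decide (y < v))).max? = some x := by
          rw [hfc, List.max?_eq_some_iff]
          constructor
          · exact List.mem_cons_self
          · intro b hb
            rcases List.mem_cons.mp hb with rfl | hb
            · exact le_refl _
            · have hb' := List.mem_filter.mp hb
              by_contra hbx
              have : b ∈ t.filter (fun y => decide (x < y ∧ y < v)) := by
                rw [List.mem_filter]
                refine ⟨hb'.1, ?_⟩
                simp only [decide_eq_true_eq] at hb' ⊢
                omega
              rw [hnil] at this; exact absurd this (List.not_mem_nil)
        rw [this]
        simp [List.idxOf_cons_self]
      · have hm' := List.max?_eq_some_iff.mp hmax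
        have hm'f := List.mem_filter.mp hm'.1
        simp only [decide_eq_true_eq] at hm'f
        have : ((x :: t).filter (fun y => decide (y < v))).max? = some m' := by
          rw [hfc, List.max?_eq_some_iff]
          constructor
          · refine List.mem_cons_of_mem _ ?_
            rw [List.mem_filter]
            refine ⟨hm'f.1, by simp only [decide_eq_true_eq]; omega⟩
          · intro b hb
            rcases List.mem_cons.mp hb with rfl | hb
            · omega
            · have hb' := List.mem_filter.mp hb
              simp only [decide_eq_true_eq] at hb'
              by_cases hbx : x < b
              · exact hm'.2 b (List.mem_filter.mpr ⟨hb'.1, by simp only [decide_eq_true_eq]; omega⟩)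
              · omega
        rw [this]
        have hne : x ≠ m' := by omega
        simp only [List.idxOf_cons_ne _ hne]
        push_cast
        ring_nf
    · have hst : mLow v (none, none) (s, x) = (none, none) := by
        unfold mLow; rw [if_neg (by simpa using h1)]
      rw [hst, ih (s+1)]
      have hfc : (x :: t).filter (fun y => decide (y < v))
          = t.filter (fun y => decide (y < v)) := by
        simp [List.filter_cons]; omega
      rw [hfc]
      rcases hmax : (t.filter (fun y => decide (y < v))).max? with _ | m
      · rfl
      · have hm := List.max?_eq_some_iff.mp hmax
        have hmf := List.mem_filter.mp hm.1
        simp only [decide_eq_true_eq] at hmf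
        have hne : x ≠ m := by omega
        simp only [List.idxOf_cons_ne _ hne]
        push_cast
        ring_nf

theorem upGo (v : Int) (l : List Int) : ∀ (s c j : Int), v < c →
    (PySem.List.enumerate l s).foldl (mUp v) (some (c - v), some j) =
      match (l.filter (fun x => decide (v < x ∧ x < c))).min? with
      | none => (some (c - v), some j)
      | some m => (some (m - v), some (s + (List.idxOf m l : Int))) := by
  induction l with
  | nil => intro s c j _; rfl
  | cons x t ih =>
    intro s c j hc
    rw [PySem.List.enumerate_cons, List.foldl_cons]
    by_cases h1 : v < x
    · by_cases h2 : x < c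
      · have hst : mUp v (some (c - v), some j) (s, x) = (some (x - v), some s) := by
          unfold mUp pvLtInf
          simp only [h1, if_true]
          have : |v - x| = x - v := by rw [abs_of_neg (by omega)]; ring
          rw [this]
          simp only [decide_eq_true_eq]
          rw [if_pos (by omega)]
        rw [hst, ih (s+1) x s h1]
        have hfc : (x :: t).filter (fun y => decide (v < y ∧ y < c))
            = x :: t.filter (fun y => decide (v < y ∧ y < c)) := by
          simp [h1, h2]
        rcases hmax : (t.filter (fun y => decide (v < y ∧ y < x))).min? with _ | m'
        · have hnil : t.filter (fun y => decide (v < y ∧ y < x)) = [] := List.min?_eq_none_iff.mp hmax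
          have : ((x :: t).filter (fun y => decide (v < y ∧ y < c))).min? = some x := by
            rw [hfc, List.min?_eq_some_iff]
            constructor
            · exact List.mem_cons_self
            · intro b hb
              rcases List.mem_cons.mp hb with rfl | hb
              · exact le_refl _
              · have hb' := List.mem_filter.mp hb
                by_contra hbx
                have : b ∈ t.filter (fun y => decide (v < y ∧ y < x)) := by
                  rw [List.mem_filter]
                  refine ⟨hb'.1, ?_⟩
                  simp only [decide_eq_true_eq] at hb' ⊢
                  omega
                rw [hnil] at this; exact absurd this (List.not_mem_nil)
          rw [this]
          simp [List.idxOf_cons_self]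
        · have hm' := List.min?_eq_some_iff.mp hmax
          have hm'f := List.mem_filter.mp hm'.1
          simp only [decide_eq_true_eq] at hm'f
          have : ((x :: t).filter (fun y => decide (v < y ∧ y < c))).min? = some m' := by
            rw [hfc, List.min?_eq_some_iff]
            constructor
            · refine List.mem_cons_of_mem _ ?_
              rw [List.mem_filter]
              refine ⟨hm'f.1, by simp only [decide_eq_true_eq]; omega⟩
            · intro b hb
              rcases List.mem_cons.mp hb with rfl | hb
              · omega
              · have hb' := List.mem_filter.mp hb
                simp only [decide_eq_true_eq] at hb'
                by_cases hbx : b < x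
                · exact hm'.2 b (List.mem_filter.mpr ⟨hb'.1, by simp only [decide_eq_true_eq]; omega⟩)
                · omega
          rw [this]
          have hne : x ≠ m' := by omega
          simp only [List.idxOf_cons_ne _ hne]
          push_cast
          ring_nf
      · have hst : mUp v (some (c - v), some j) (s, x) = (some (c - v), some j) := by
          unfold mUp pvLtInf
          simp only [h1, if_true]
          have : |v - x| = x - v := by rw [abs_of_neg (by omega)]; ring
          rw [this]
          simp only [decide_eq_true_eq]
          rw [if_neg (by omega)]
        rw [hst, ih (s+1) c j hc]
        have hfc : (x :: t).filter (fun y => decide (v < y ∧ y < c))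
            = t.filter (fun y => decide (v < y ∧ y < c)) := by
          simp [List.filter_cons]; omega
        rw [hfc]
        rcases hmax : (t.filter (fun y => decide (v < y ∧ y < c))).min? with _ | m
        · rfl
        · have hm := List.min?_eq_some_iff.mp hmax
          have hmf := List.mem_filter.mp hm.1
          simp only [decide_eq_true_eq] at hmf
          have hne : x ≠ m := by omega
          simp only [List.idxOf_cons_ne _ hne]
          push_cast
          ring_nf
    · have hst : mUp v (some (c - v), some j) (s, x) = (some (c - v), some j) := by
        unfold mUp; rw [if_neg (by simpa using h1)]
      rw [hst, ih (s+1) c j hc]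
      have hfc : (x :: t).filter (fun y => decide (v < y ∧ y < c))
          = t.filter (fun y => decide (v < y ∧ y < c)) := by
        simp [List.filter_cons]; omega
      rw [hfc]
      rcases hmax : (t.filter (fun y => decide (v < y ∧ y < c))).min? with _ | m
      · rfl
      · have hm := List.min?_eq_some_iff.mp hmax
        have hmf := List.mem_filter.mp hm.1
        simp only [decide_eq_true_eq] at hmf
        have hne : x ≠ m := by omega
        simp only [List.idxOf_cons_ne _ hne]
        push_cast
        ring_nf

theorem upStart (v : Int) (l : List Int) : ∀ (s : Int),
    (PySem.List.enumerate l s).foldl (mUp v) (none, none) =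
      match (l.filter (fun x => decide (v < x))).min? with
      | none => (none, none)
      | some m => (some (m - v), some (s + (List.idxOf m l : Int))) := by
  induction l with
  | nil => intro s; rfl
  | cons x t ih =>
    intro s
    rw [PySem.List.enumerate_cons, List.foldl_cons]
    by_cases h1 : v < x
    · have hst : mUp v (none, none) (s, x) = (some (x - v), some s) := by
        unfold mUp pvLtInf
        simp only [h1, if_true]
        have : |v - x| = x - v := by rw [abs_of_neg (by omega)]; ring
        rw [this]
      rw [hst, upGo v t (s+1) x s h1]
      have hfc : (x :: t).filter (fun y => decide (v < y))
          = x :: t.filter (fun y => decide (v < y)) := by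
        simp [h1]
      rcases hmax : (t.filter (fun y => decide (v < y ∧ y < x))).min? with _ | m'
      · have hnil : t.filter (fun y => decide (v < y ∧ y < x)) = [] := List.min?_eq_none_iff.mp hmax
        have : ((x :: t).filter (fun y => decide (v < y))).min? = some x := by
          rw [hfc, List.min?_eq_some_iff]
          constructor
          · exact List.mem_cons_self
          · intro b hb
            rcases List.mem_cons.mp hb with rfl | hb
            · exact le_refl _
            · have hb' := List.mem_filter.mp hb
              by_contra hbx
              have : b ∈ t.filter (fun y => decide (v < y ∧ y < x)) := by
                rw [List.mem_filter]
                refine ⟨hb'.1, ?_⟩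
                simp only [decide_eq_true_eq] at hb' ⊢
                omega
              rw [hnil] at this; exact absurd this (List.not_mem_nil)
        rw [this]
        simp [List.idxOf_cons_self]
      · have hm' := List.min?_eq_some_iff.mp hmax
        have hm'f := List.mem_filter.mp hm'.1
        simp only [decide_eq_true_eq] at hm'f
        have : ((x :: t).filter (fun y => decide (v < y))).min? = some m' := by
          rw [hfc, List.min?_eq_some_iff]
          constructor
          · refine List.mem_cons_of_mem _ ?_
            rw [List.mem_filter]
            refine ⟨hm'f.1, by simp only [decide_eq_true_eq]; omega⟩
          · intro b hb
            rcases List.mem_cons.mp hb with rfl | hb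
            · omega
            · have hb' := List.mem_filter.mp hb
              simp only [decide_eq_true_eq] at hb'
              by_cases hbx : b < x
              · exact hm'.2 b (List.mem_filter.mpr ⟨hb'.1, by simp only [decide_eq_true_eq]; omega⟩)
              · omega
        rw [this]
        have hne : x ≠ m' := by omega
        simp only [List.idxOf_cons_ne _ hne]
        push_cast
        ring_nf
    · have hst : mUp v (none, none) (s, x) = (none, none) := by
        unfold mUp; rw [if_neg (by simpa using h1)]
      rw [hst, ih (s+1)]
      have hfc : (x :: t).filter (fun y => decide (v < y))
          = t.filter (fun y => decide (v < y)) := by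
        simp [List.filter_cons]; omega
      rw [hfc]
      rcases hmax : (t.filter (fun y => decide (v < y))).min? with _ | m
      · rfl
      · have hm := List.min?_eq_some_iff.mp hmax
        have hmf := List.mem_filter.mp hm.1
        simp only [decide_eq_true_eq] at hmf
        have hne : x ≠ m := by omega
        simp only [List.idxOf_cons_ne _ hne]
        push_cast
        ring_nf

def innerA (l : List Int) (p : Int × Int) : Option Int × Option Int :=
  let st := (PySem.List.enumerate l 0).foldl
    (fun (st : (Option Int × Option Int) × (Option Int × Option Int)) q =>
      if q.1 == p.1 then st
      else
        let diff := |p.2 - q.2|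
        if q.2 < p.2 then
          (if pvLtInf diff st.1.1 then (some diff, some q.1) else st.1, st.2)
        else if p.2 < q.2 then
          (st.1, if pvLtInf diff st.2.1 then (some diff, some q.1) else st.2)
        else st)
    ((none, none), (none, none))
  (st.1.2, st.2.2)

theorem A_eq_ref (l : List Int) :
    search_closest l = l.map (fun v => (lowIdx l v, highIdx l v)) := by
  have h0 : search_closest l
      = (PySem.List.enumerate l 0).foldl (fun r p => r ++ [innerA l p]) [] := rfl
  rw [h0, PySem.List.foldl_append_singleton_eq_map]
  apply List.ext_getElem
  · simp [PySem.List.length_enumerate]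
  · intro k h1 h2
    simp only [List.nil_append, List.getElem_map, PySem.List.getElem_enumerate]
    have hskip : ∀ q ∈ PySem.List.enumerate l 0, q.1 = ((0 : Int) + k) → q.2 = l[k]'(by
        simpa [PySem.List.length_enumerate] using h1) := by
      intro q hq hq1
      rcases (PySem.List.mem_enumerate_iff _ _ _).mp hq with ⟨k', hk', rfl⟩
      simp only at hq1
      have : k' = k := by omega
      subst this
      rfl
    have hk : k < l.length := by
      simpa [PySem.List.length_enumerate] using h1
    unfold innerA
    rw [inner_split ((0:Int)+k) (l[k]) _ hskip, lowStart, upStart]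
    simp only []
    rcases hmax : (l.filter (fun x => decide (x < l[k]))).max? with _ | m <;>
      rcases hmin : (l.filter (fun x => decide (l[k] < x))).min? with _ | m' <;>
        simp [lowIdx, highIdx, hmax, hmin]

theorem idxOf?_of_mem (l : List Int) (x : Int) (h : x ∈ l) : List.idxOf? x l = some (l.idxOf x) := by
  induction l with
  | nil => simp at h
  | cons y t ih =>
    by_cases hxy : y = x
    · subst hxy; simp [List.idxOf?_cons, List.idxOf_cons_self]
    · rcases List.mem_cons.mp h with rfl | h2
      · simp at hxy
      · simp [List.idxOf?_cons, hxy, ih h2]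

theorem firstFold (l : List Int) : ∀ (s : Int) (d : PySem.Dict Int Int) (x : Int),
    ((PySem.List.enumerate l s).foldl
        (fun d p => if d.contains p.2 then d else d.insert p.2 p.1) d).get? x =
      match d.get? x with
      | some w => some w
      | none => (List.idxOf? x l).map (fun k => s + (k : Int)) := by
  induction l with
  | nil =>
    intro s d x
    rw [PySem.List.enumerate_nil, List.foldl_nil]
    cases d.get? x <;> simp
  | cons y t ih =>
    intro s d x
    rw [PySem.List.enumerate_cons, List.foldl_cons]
    by_cases hcy : d.contains y = true
    · rw [if_pos hcy, ih (s+1) d x]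
      by_cases hxy : x = y
      · subst hxy
        have hs : (d.get? x).isSome = true := by
          rw [← PySem.Dict.contains_eq_isSome_get?]; exact hcy
        obtain ⟨w, hw⟩ := Option.isSome_iff_exists.mp hs
        rw [hw]
      · cases hg : d.get? x
        · simp only [List.idxOf?_cons]
          have : (y == x) = false := by simp; exact fun h => hxy h.symm
          rw [this]
          simp only [Bool.false_eq_true, if_false]
          cases List.idxOf? x t
          · simp
          · simp; ring
        · rfl
    · rw [if_neg hcy, ih (s+1) _ x]
      by_cases hxy : x = y
      · subst hxy
        rw [PySem.Dict.get?_insert_self]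
        have hn : d.get? x = none := (PySem.Dict.get?_eq_none_iff_contains d x).mpr (by simpa using hcy)
        rw [hn]
        simp [List.idxOf?_cons]
      · rw [PySem.Dict.get?_insert_of_ne _ _ hxy]
        cases hg : d.get? x
        · simp only [List.idxOf?_cons]
          have : (y == x) = false := by simp; exact fun h => hxy h.symm
          rw [this]
          simp only [Bool.false_eq_true, if_false]
          cases List.idxOf? x t
          · simp
          · simp; ring
        · rfl

theorem firstKeys (l : List Int) : ∀ (s : Int) (d : PySem.Dict Int Int),
    ((PySem.List.enumerate l s).foldl
        (fun d p => if d.contains p.2 then d else d.insert p.2 p.1) d).keys =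
      PySem.Set.update d.keys l := by
  induction l with
  | nil => intro s d; rfl
  | cons y t ih =>
    intro s d
    rw [PySem.List.enumerate_cons, List.foldl_cons]
    have hupd : PySem.Set.update d.keys (y :: t) = PySem.Set.update (PySem.Set.add d.keys y) t := rfl
    rw [hupd]
    by_cases hcy : d.contains y = true
    · rw [if_pos hcy, ih (s+1) d]
      have : PySem.Set.add d.keys y = d.keys := by
        have := (PySem.Dict.contains_iff_mem_keys d y).mp hcy
        simp [PySem.Set.add, this]
      rw [this]
    · rw [if_neg hcy, ih (s+1) _]
      have h1 : (d.insert y s).keys = d.keys ++ [y] :=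
        PySem.Dict.keys_insert_of_not_contains _ _ (by simpa using hcy)
      have h2 : PySem.Set.add d.keys y = d.keys ++ [y] := by
        have : y ∉ d.keys := by rw [← PySem.Dict.contains_iff_mem_keys]; simp [hcy]
        simp [PySem.Set.add, this]
      rw [h1, h2]

def prevIn (p : Option Int) : List Int → Int → Option Int
  | [], _ => none
  | u :: t, x => if x = u then p else prevIn (some u) t x

def nextIn : List Int → Int → Option Int
  | [], _ => none
  | u :: t, x => if x = u then t.head? else nextIn t x

theorem pass_pred_untouched (first : PySem.Dict Int Int) : ∀ (vs : List Int) (p : Option Int)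
    (pred succ : PySem.Dict Int (Option Int)) (y : Int), y ∉ vs →
    ((pvPass first vs p pred succ).1).get? y = pred.get? y := by
  intro vs
  induction vs with
  | nil => intro p pred succ y _; rfl
  | cons v rest ih =>
    intro p pred succ y hy
    have hyv : y ≠ v := fun h => hy (h ▸ List.mem_cons_self)
    have hyr : y ∉ rest := fun h => hy (List.mem_cons_of_mem _ h)
    show ((pvPass first rest (some v) _ _).1).get? y = _
    rw [ih _ _ _ _ hyr, PySem.Dict.get?_insert_of_ne _ _ hyv]

theorem pass_succ_untouched (first : PySem.Dict Int Int) : ∀ (vs : List Int) (p : Option Int)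
    (pred succ : PySem.Dict Int (Option Int)) (y : Int), y ∉ vs → p ≠ some y →
    ((pvPass first vs p pred succ).2).get? y = succ.get? y := by
  intro vs
  induction vs with
  | nil => intro p pred succ y _ _; rfl
  | cons v rest ih =>
    intro p pred succ y hy hp
    have hyv : y ≠ v := fun h => hy (h ▸ List.mem_cons_self)
    have hyr : y ∉ rest := fun h => hy (List.mem_cons_of_mem _ h)
    show ((pvPass first rest (some v) _ _).2).get? y = _
    rw [ih _ _ _ _ hyr (by simp [Ne.symm hyv])]
    rw [PySem.Dict.get?_insert_of_ne _ _ hyv]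
    cases p with
    | none => rfl
    | some p0 =>
      have : y ≠ p0 := fun h => hp (by rw [h])
      exact PySem.Dict.get?_insert_of_ne _ _ this

theorem pass_pred_get (first : PySem.Dict Int Int) : ∀ (vs : List Int) (p : Option Int)
    (pred succ : PySem.Dict Int (Option Int)) (x : Int), vs.Nodup → x ∈ vs →
    ((pvPass first vs p pred succ).1).get? x
      = some ((prevIn p vs x).map (fun q => first.getD q 0)) := by
  intro vs
  induction vs with
  | nil => intro p pred succ x _ hx; simp at hx
  | cons v rest ih =>
    intro p pred succ x hnd hx
    by_cases hxv : x = v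
    · subst hxv
      have hxr : x ∉ rest := (List.nodup_cons.mp hnd).1
      show ((pvPass first rest (some x) _ _).1).get? x = _
      rw [pass_pred_untouched first rest _ _ _ _ hxr, PySem.Dict.get?_insert_self]
      simp [prevIn]
    · have hxr : x ∈ rest := by
        rcases List.mem_cons.mp hx with rfl | h2
        · exact absurd rfl hxv
        · exact h2
      show ((pvPass first rest (some v) _ _).1).get? x = _
      rw [ih _ _ _ _ (List.nodup_cons.mp hnd).2 hxr]
      simp [prevIn, hxv]

theorem pass_succ_get (first : PySem.Dict Int Int) : ∀ (vs : List Int) (p : Option Int)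
    (pred succ : PySem.Dict Int (Option Int)) (x : Int), vs.Nodup → x ∈ vs →
    ((pvPass first vs p pred succ).2).get? x
      = some ((nextIn vs x).map (fun q => first.getD q 0)) := by
  intro vs
  induction vs with
  | nil => intro p pred succ x _ hx; simp at hx
  | cons v rest ih =>
    intro p pred succ x hnd hx
    by_cases hxv : x = v
    · subst hxv
      have hxr : x ∉ rest := (List.nodup_cons.mp hnd).1
      cases rest with
      | nil =>
        show ((match p with
            | none => succ
            | some q => succ.insert q (some (first.getD x 0))).insert x none).get? x = _
        rw [PySem.Dict.get?_insert_self]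
        simp [nextIn]
      | cons w rest' =>
        have hxw : x ≠ w := fun h => hxr (h ▸ List.mem_cons_self)
        have hxr' : x ∉ rest' := fun h => hxr (List.mem_cons_of_mem _ h)
        show ((pvPass first rest' (some w) _ _).2).get? x = _
        rw [pass_succ_untouched first rest' _ _ _ _ hxr' (by simp [Ne.symm hxw])]
        rw [PySem.Dict.get?_insert_of_ne _ _ hxw, PySem.Dict.get?_insert_self]
        simp [nextIn]
    · have hxr : x ∈ rest := by
        rcases List.mem_cons.mp hx with rfl | h2
        · exact absurd rfl hxv
        · exact h2
      show ((pvPass first rest (some v) _ _).2).get? x = _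
      rw [ih _ _ _ _ (List.nodup_cons.mp hnd).2 hxr]
      simp [nextIn, hxv]

theorem prevIn_sorted : ∀ (vs : List Int) (p : Option Int) (x : Int),
    vs.Pairwise (· < ·) → (∀ a, p = some a → ∀ u ∈ vs, a < u) → x ∈ vs →
    prevIn p vs x = (p.toList ++ vs.filter (fun u => decide (u < x))).getLast? := by
  intro vs
  induction vs with
  | nil => intro p x _ _ hx; simp at hx
  | cons u t ih =>
    intro p x hs hp hx
    by_cases hxu : x = u
    · subst hxu
      have hft : t.filter (fun u => decide (u < x)) = [] := by
        rw [List.filter_eq_nil_iff]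
        intro a ha
        have := (List.pairwise_cons.mp hs).1 a ha
        simp only [decide_eq_true_eq]
        omega
      have hL : prevIn p (x :: t) x = p := by simp [prevIn]
      have hcond : decide (x < x) = false := by simp
      have hR : (x :: t).filter (fun u => decide (u < x)) = [] := by
        simp [hft]
      rw [hL, hR, List.append_nil]
      cases p <;> simp
    · have hxt : x ∈ t := by
        rcases List.mem_cons.mp hx with rfl | h2
        · exact absurd rfl hxu
        · exact h2
      have hux : u < x := (List.pairwise_cons.mp hs).1 x hxt
      have hL : prevIn p (u :: t) x = prevIn (some u) t x := by simp [prevIn, hxu]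
      rw [hL, ih (some u) x (List.pairwise_cons.mp hs).2
        (by rintro a ⟨rfl⟩; exact (List.pairwise_cons.mp hs).1) hxt]
      have hcond : decide (u < x) = true := by simpa using hux
      have hR : (u :: t).filter (fun y => decide (y < x))
          = u :: t.filter (fun y => decide (y < x)) := by
        simp [hcond]
      rw [hR]
      have hne : u :: t.filter (fun y => decide (y < x)) ≠ [] := by simp
      rw [List.getLast?_append_of_ne_nil _ hne]
      simp

theorem nextIn_sorted : ∀ (vs : List Int) (x : Int),
    vs.Pairwise (· < ·) → x ∈ vs →
    nextIn vs x = (vs.filter (fun u => decide (x < u))).head? := by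
  intro vs
  induction vs with
  | nil => intro x _ hx; simp at hx
  | cons u t ih =>
    intro x hs hx
    by_cases hxu : x = u
    · subst hxu
      have hft : t.filter (fun u => decide (x < u)) = t :=
        List.filter_eq_self.mpr (fun a ha => by
          simpa using (List.pairwise_cons.mp hs).1 a ha)
      have hL : nextIn (x :: t) x = t.head? := by simp [nextIn]
      have hcond : decide (x < x) = false := by simp
      rw [hL, List.filter_cons, hcond]
      simp [hft]
    · have hxt : x ∈ t := by
        rcases List.mem_cons.mp hx with rfl | h2
        · exact absurd rfl hxu
        · exact h2
      have hux : u < x := (List.pairwise_cons.mp hs).1 x hxt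
      have hL : nextIn (u :: t) x = nextIn t x := by simp [nextIn, hxu]
      have hcond : decide (x < u) = false := by simp; omega
      rw [hL, List.filter_cons, hcond]
      simp [ih x (List.pairwise_cons.mp hs).2 hxt]

theorem le_getLast_of_pairwise : ∀ (ys : List Int), ys.Pairwise (· < ·) →
    ∀ g, ys.getLast? = some g → ∀ y ∈ ys, y ≤ g := by
  intro ys
  induction ys with
  | nil => intro _ g hg; simp at hg
  | cons u t ih =>
    intro hs g hg y hy
    cases t with
    | nil =>
      simp at hg
      rcases List.mem_cons.mp hy with rfl | h
      · omega
      · simp at h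
    | cons w t' =>
      rw [List.getLast?_cons_cons] at hg
      rcases List.mem_cons.mp hy with rfl | h
      · have hw : w ≤ g := ih (List.pairwise_cons.mp hs).2 g hg w List.mem_cons_self
        have : y < w := (List.pairwise_cons.mp hs).1 w List.mem_cons_self
        omega
      · exact ih (List.pairwise_cons.mp hs).2 g hg y h

theorem ge_head_of_pairwise (ys : List Int) (hs : ys.Pairwise (· < ·))
    (h : Int) (hh : ys.head? = some h) : ∀ y ∈ ys, h ≤ y := by
  cases ys with
  | nil => simp at hh
  | cons u t =>
    simp at hh
    subst hh
    intro y hy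
    rcases List.mem_cons.mp hy with rfl | h2
    · omega
    · exact le_of_lt ((List.pairwise_cons.mp hs).1 y h2)

theorem getLast_filter_eq_max (l vs : List Int) (x : Int)
    (hs : vs.Pairwise (· < ·)) (hm : ∀ y, y ∈ vs ↔ y ∈ l) :
    (vs.filter (fun u => decide (u < x))).getLast? = (l.filter (fun u => decide (u < x))).max? := by
  rcases hmax : (l.filter (fun u => decide (u < x))).max? with _ | m
  · have hnil : l.filter (fun u => decide (u < x)) = [] := List.max?_eq_none_iff.mp hmax
    have : vs.filter (fun u => decide (u < x)) = [] := by
      rw [List.filter_eq_nil_iff]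
      intro a ha hlt
      have : a ∈ l.filter (fun u => decide (u < x)) :=
        List.mem_filter.mpr ⟨(hm a).mp ha, hlt⟩
      rw [hnil] at this
      exact absurd this (List.not_mem_nil)
    simp [this]
  · have hmm := List.max?_eq_some_iff.mp hmax
    have hmf := List.mem_filter.mp hmm.1
    have hmvs : m ∈ vs.filter (fun u => decide (u < x)) :=
      List.mem_filter.mpr ⟨(hm m).mpr hmf.1, hmf.2⟩
    have hne : vs.filter (fun u => decide (u < x)) ≠ [] := by
      intro h; rw [h] at hmvs; exact absurd hmvs (List.not_mem_nil)
    obtain ⟨g, hg⟩ := Option.isSome_iff_exists.mp (List.getLast?_isSome.mpr hne)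
    rw [hg]
    have hgf := List.mem_filter.mp (List.mem_of_getLast? hg)
    have h1 : g ≤ m := hmm.2 g (List.mem_filter.mpr ⟨(hm g).mp hgf.1, hgf.2⟩)
    have h2 : m ≤ g := le_getLast_of_pairwise _ (hs.filter _) g hg m hmvs
    exact congrArg some (le_antisymm h1 h2)

theorem head_filter_eq_min (l vs : List Int) (x : Int)
    (hs : vs.Pairwise (· < ·)) (hm : ∀ y, y ∈ vs ↔ y ∈ l) :
    (vs.filter (fun u => decide (x < u))).head? = (l.filter (fun u => decide (x < u))).min? := by
  rcases hmin : (l.filter (fun u => decide (x < u))).min? with _ | m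
  · have hnil : l.filter (fun u => decide (x < u)) = [] := List.min?_eq_none_iff.mp hmin
    have : vs.filter (fun u => decide (x < u)) = [] := by
      rw [List.filter_eq_nil_iff]
      intro a ha hlt
      have : a ∈ l.filter (fun u => decide (x < u)) :=
        List.mem_filter.mpr ⟨(hm a).mp ha, hlt⟩
      rw [hnil] at this
      exact absurd this (List.not_mem_nil)
    simp [this]
  · have hmm := List.min?_eq_some_iff.mp hmin
    have hmf := List.mem_filter.mp hmm.1
    have hmvs : m ∈ vs.filter (fun u => decide (x < u)) :=
      List.mem_filter.mpr ⟨(hm m).mpr hmf.1, hmf.2⟩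
    have hne : vs.filter (fun u => decide (x < u)) ≠ [] := by
      intro h; rw [h] at hmvs; exact absurd hmvs (List.not_mem_nil)
    obtain ⟨g, hg⟩ := Option.isSome_iff_exists.mp (List.isSome_head?.mpr hne)
    rw [hg]
    have hgf := List.mem_filter.mp (List.mem_of_mem_head? hg)
    have h1 : m ≤ g := hmm.2 g (List.mem_filter.mpr ⟨(hm g).mp hgf.1, hgf.2⟩)
    have h2 : g ≤ m := ge_head_of_pairwise _ (hs.filter _) g hg m hmvs
    exact congrArg some (le_antisymm h2 h1)

theorem B_eq_ref (l : List Int) :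
    search_closest_alt l = l.map (fun v => (lowIdx l v, highIdx l v)) := by
  unfold search_closest_alt
  simp only []
  set first := (PySem.List.enumerate l 0).foldl
    (fun d p => if d.contains p.2 then d else d.insert p.2 p.1) PySem.Dict.empty with hfirstdef
  set vals := PySem.List.sorted first.keys (fun x => x) false with hvalsdef
  have hkeys : first.keys = PySem.Set.ofList l := by
    rw [hfirstdef, firstKeys l 0 PySem.Dict.empty]; rfl
  have hpair : vals.Pairwise (· < ·) := by
    rw [hvalsdef, hkeys]; exact PySem.List.sorted_ofList_pairwise_lt l
  have hmem : ∀ y, y ∈ vals ↔ y ∈ l := by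
    intro y
    rw [hvalsdef, hkeys, PySem.List.mem_sorted, PySem.Set.mem_ofList]
  have hnodup : vals.Nodup := hpair.imp (fun h => ne_of_lt h)
  have hfirst : ∀ x ∈ l, first.getD x 0 = ((l.idxOf x : Nat) : Int) := by
    intro x hx
    rw [PySem.Dict.getD_eq_get?_getD, hfirstdef, firstFold l 0 PySem.Dict.empty x]
    rw [show (PySem.Dict.empty : PySem.Dict Int Int).get? x = none from rfl]
    rw [idxOf?_of_mem l x hx]
    simp
  apply List.map_eq_map_iff.mpr
  intro v hv
  have hvv : v ∈ vals := (hmem v).mpr hv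
  have hp1 : (pvPass first vals none PySem.Dict.empty PySem.Dict.empty).1.getD v none
      = lowIdx l v := by
    rw [PySem.Dict.getD_eq_get?_getD, pass_pred_get first vals none _ _ v hnodup hvv]
    simp only [Option.getD_some]
    rw [prevIn_sorted vals none v hpair (by rintro a ⟨⟩) hvv]
    rw [show (none : Option Int).toList ++ vals.filter (fun u => decide (u < v))
        = vals.filter (fun u => decide (u < v)) from rfl]
    rw [getLast_filter_eq_max l vals v hpair hmem]
    unfold lowIdx
    rcases hmax : (l.filter (fun u => decide (u < v))).max? with _ | m
    · rfl
    · have hmm := List.max?_eq_some_iff.mp hmax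
      have hml : m ∈ l := (List.mem_filter.mp hmm.1).1
      simp [hfirst m hml]
  have hp2 : (pvPass first vals none PySem.Dict.empty PySem.Dict.empty).2.getD v none
      = highIdx l v := by
    rw [PySem.Dict.getD_eq_get?_getD, pass_succ_get first vals none _ _ v hnodup hvv]
    simp only [Option.getD_some]
    rw [nextIn_sorted vals v hpair hvv]
    rw [head_filter_eq_min l vals v hpair hmem]
    unfold highIdx
    rcases hmin : (l.filter (fun u => decide (v < u))).min? with _ | m
    · rfl
    · have hmm := List.min?_eq_some_iff.mp hmin
      have hml : m ∈ l := (List.mem_filter.mp hmm.1).1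
      simp [hfirst m hml]
  rw [hp1, hp2]

-- ===== VERDICT (by name: the statement is the Claim_ definition above) =====
theorem search_closest_spec : Claim_equal_search_closest := by
  intro l _
  unfold Spec_search_closest
  rw [A_eq_ref, B_eq_ref]
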